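-- pv_equiv track=rewrite | github.com/elydre/elydre | projet/lite/plan_calendar.py | to_french_date
-- ===== SOURCE A (Python) =====
-- def to_french_date(string):
--     traduction = {
--         'Monday':    '   Lundi',
--         'Tuesday':   '   Mardi',
--         'Wednesday': 'Mercredi',
--         'Thursday':  '   Jeudi',
--         'Friday':    'Vendredi',
--         'Saturday':  '  Samedi',
--         'Sunday':    'Dimanche'
--     }
--     for key, value in traduction.items():
--         string = string.replace(key, value)
--     return string
-- ===== SOURCE B (Python) =====
-- _PAIRS = [
--     ('Monday',    '   Lundi'),
--     ('Tuesday',   '   Mardi'),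
--     ('Wednesday', 'Mercredi'),
--     ('Thursday',  '   Jeudi'),
--     ('Friday',    'Vendredi'),
--     ('Saturday',  '  Samedi'),
--     ('Sunday',    'Dimanche'),
-- ]
--
-- def to_french_date(string):
--     out = []
--     i = 0
--     n = len(string)
--     while i < n:
--         for key, value in _PAIRS:
--             if string.startswith(key, i):
--                 out.append(value)
--                 i += len(key)
--                 break
--         else:
--             out.append(string[i])
--             i += 1
--     return ''.join(out)
-- ===== Notes on version B (the rewrite author's own statement) =====
-- stated objective: alternative
-- what changed: Instead of seven full-string str.replace passes (one per English day name), B makes a single left-to-right pass over the string, checking at each position whether a day name starts there and appending its French translation (or the character) to an output buffer.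
import Mathlib
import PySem

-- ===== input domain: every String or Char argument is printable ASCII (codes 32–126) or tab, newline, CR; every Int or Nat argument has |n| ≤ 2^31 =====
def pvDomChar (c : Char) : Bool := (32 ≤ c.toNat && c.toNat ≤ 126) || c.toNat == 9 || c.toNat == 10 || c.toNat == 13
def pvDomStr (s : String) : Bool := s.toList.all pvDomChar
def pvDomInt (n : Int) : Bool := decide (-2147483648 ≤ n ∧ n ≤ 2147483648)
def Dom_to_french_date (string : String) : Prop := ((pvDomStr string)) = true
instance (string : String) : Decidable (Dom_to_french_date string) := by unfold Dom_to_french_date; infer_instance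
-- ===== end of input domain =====

-- B replaces A's seven full-string str.replace passes by a single left-to-right scan that
-- substitutes a French day name wherever an English one starts (objective: alternative).

-- ===== PORT A =====
def to_french_date (string : String) : String :=
  let traduction : PySem.Dict String String :=
    PySem.Dict.ofList [("Monday", "   Lundi"), ("Tuesday", "   Mardi"),
      ("Wednesday", "Mercredi"), ("Thursday", "   Jeudi"), ("Friday", "Vendredi"),
      ("Saturday", "  Samedi"), ("Sunday", "Dimanche")]
  traduction.items.foldl (fun s kv => PySem.Str.replace s kv.1 kv.2) string

-- ===== PORT B =====
-- B's translation table (list of pairs, in order)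
def pvTradB : List (String × String) :=
  [("Monday", "   Lundi"), ("Tuesday", "   Mardi"),
   ("Wednesday", "Mercredi"), ("Thursday", "   Jeudi"), ("Friday", "Vendredi"),
   ("Saturday", "  Samedi"), ("Sunday", "Dimanche")]

-- B's inner `for … break/else`: first table entry whose key starts at the current position
def pvFindB (kvs : List (String × String)) (rest : List Char) : Option (String × String) :=
  match kvs with
  | [] => none
  | (k, v) :: kvs' => if k.toList.isPrefixOf rest then some (k, v) else pvFindB kvs' rest

-- B's `while i < n` loop over the remaining characters, appending to `out`
def pvScanB (rest : List Char) : List Char :=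
  match rest with
  | [] => []
  | c :: t =>
    match pvFindB pvTradB (c :: t) with
    | some (k, v) => v.toList ++ pvScanB (t.drop (k.toList.length - 1))
    | none => c :: pvScanB t
termination_by rest.length
decreasing_by
  all_goals simp

def to_french_date_alt (string : String) : String := String.ofList (pvScanB string.toList)

-- ===== PRECONDITION & SPEC =====
def Spec_to_french_date (string : String) (out : String) : Prop := out = to_french_date_alt string
instance (string : String) (out : String) : Decidable (Spec_to_french_date string out) := by unfold Spec_to_french_date; infer_instance

-- ===== CLAIM (what is proved, stated in full; the proofs are below) =====
def Claim_equal_to_french_date : Prop := ∀ (string : String), Dom_to_french_date string → Spec_to_french_date string (to_french_date string)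

-- ===== LEMMAS AND PROOFS =====

-- A's str.replace (all occurrences, nonempty pattern), as a direct structural scan
def pvRepF (k v : List Char) (s : List Char) : List Char :=
  match s with
  | [] => []
  | c :: t =>
    if k.isPrefixOf (c :: t) then v ++ pvRepF k v (t.drop (k.length - 1))
    else c :: pvRepF k v t
termination_by s.length
decreasing_by
  all_goals simp

-- generic versions of B's helpers, over char-list tables
def pvFindF (L : List (List Char × List Char)) (s : List Char) : Option (List Char × List Char) :=
  match L with
  | [] => none
  | (k, v) :: L' => if k.isPrefixOf s then some (k, v) else pvFindF L' s

def pvScanF (L : List (List Char × List Char)) (s : List Char) : List Char :=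
  match s with
  | [] => []
  | c :: t =>
    match pvFindF L (c :: t) with
    | some (k, v) => v ++ pvScanF L (t.drop (k.length - 1))
    | none => c :: pvScanF L t
termination_by s.length
decreasing_by
  all_goals simp

def pvFoldRep (L : List (List Char × List Char)) (s : List Char) : List Char :=
  L.foldl (fun acc p => pvRepF p.1 p.2 acc) s

-- prefix-incomparability
def pvInc (a b : List Char) : Prop := ¬ (a <+: b) ∧ ¬ (b <+: a)

-- the non-interference conditions that make sequential replacement = one simultaneous scan
def pvGood (L : List (List Char × List Char)) : Prop :=
  (∀ p ∈ L, p.1 ≠ [] ∧ p.2 ≠ []) ∧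
  (∀ p ∈ L, ∀ q ∈ L, p.1 ≠ q.1 → pvInc p.1 q.1) ∧
  (∀ p ∈ L, ∀ q ∈ L, ∀ j, j < p.1.length → 0 < j → pvInc (p.1.drop j) q.1) ∧
  (∀ p ∈ L, ∀ q ∈ L, ∀ j, j < p.1.length → 0 < j → pvInc (p.1.drop j) q.2) ∧
  (∀ p ∈ L, ∀ q ∈ L, ∀ j, j < p.2.length → pvInc (p.2.drop j) q.1)

def pvKVc : List (List Char × List Char) := pvTradB.map (fun p => (p.1.toList, p.2.toList))

theorem pvGood_KVc : pvGood pvKVc := by unfold pvGood pvInc; decide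

-- unfolding lemmas for pvRepF
theorem pvRepF_nil (k v : List Char) : pvRepF k v [] = [] := by simp [pvRepF]

theorem pvRepF_pos (k v : List Char) (c : Char) (t : List Char) (h : k <+: c :: t) :
    pvRepF k v (c :: t) = v ++ pvRepF k v (t.drop (k.length - 1)) := by
  rw [pvRepF.eq_def]
  simp [List.isPrefixOf_iff_prefix, h]

theorem pvRepF_neg (k v : List Char) (c : Char) (t : List Char) (h : ¬ k <+: c :: t) :
    pvRepF k v (c :: t) = c :: pvRepF k v t := by
  rw [pvRepF.eq_def]
  simp [List.isPrefixOf_iff_prefix, h]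

theorem pvRepF_self (k v x : List Char) (hk : k ≠ []) :
    pvRepF k v (k ++ x) = v ++ pvRepF k v x := by
  obtain ⟨kc, kt, rfl⟩ : ∃ kc kt, k = kc :: kt := by
    cases k with
    | nil => exact absurd rfl hk
    | cons a b => exact ⟨a, b, rfl⟩
  rw [List.cons_append, pvRepF_pos _ _ _ _ (by simp [List.cons_prefix_cons, List.prefix_append])]
  simp

-- pvRepF computes PySem.Chars.replace (nonempty pattern)
theorem pvGo_eq (k v : List Char) (hk : k ≠ []) :
    ∀ fuel s acc, s.length ≤ fuel →
      PySem.Chars.replace.go k v fuel s acc = acc.reverse ++ pvRepF k v s := by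
  intro fuel
  induction fuel with
  | zero =>
    intro s acc hs
    have : s = [] := by cases s <;> simp_all
    subst this
    rw [PySem.Chars.replace.go.eq_def]
    simp [pvRepF_nil]
  | succ n ih =>
    intro s acc hs
    cases s with
    | nil =>
      rw [PySem.Chars.replace.go.eq_def]
      simp [pvRepF_nil]
    | cons c t =>
      rw [PySem.Chars.replace.go.eq_def]
      by_cases hp : k.isPrefixOf (c :: t)
      · simp only [hp, if_true]
        obtain ⟨kc, kt, rfl⟩ : ∃ kc kt, k = kc :: kt := by
          cases k with
          | nil => exact absurd rfl hk
          | cons a b => exact ⟨a, b, rfl⟩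
        have hlen : (List.drop (kc :: kt).length (c :: t)).length ≤ n := by
          simp at hs ⊢; omega
        rw [ih _ _ hlen, pvRepF_pos _ _ _ _ (List.isPrefixOf_iff_prefix.1 hp)]
        simp [List.reverse_append]
      · simp only [hp]
        have hlen : t.length ≤ n := by simp at hs; omega
        rw [ih _ _ hlen, pvRepF_neg _ _ _ _ (fun hh => hp (List.isPrefixOf_iff_prefix.2 hh))]
        simp

theorem pvReplace_eq (k v s : List Char) (hk : k ≠ []) :
    PySem.Chars.replace s k v = pvRepF k v s := by
  have hke : k.isEmpty = false := by cases k <;> simp_all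
  have h := pvGo_eq k v hk s.length s [] le_rfl
  simp only [List.reverse_nil, List.nil_append] at h
  rw [PySem.Chars.replace, if_neg (by simp [hke]), h]

-- incomparability blocks any prefix across an appended boundary
theorem pvInc_not_prefix_append (a k x : List Char) (h : pvInc a k) : ¬ k <+: a ++ x := by
  intro hp
  rcases List.prefix_or_prefix_of_prefix hp (List.prefix_append a x) with h1 | h1
  · exact h.2 h1
  · exact h.1 h1

-- a block none of whose suffixes can start an occurrence passes through pvRepF
theorem pvRepF_append_keep (k v : List Char) (_hk : k ≠ []) :
    ∀ u x, (∀ j, j < u.length → pvInc (u.drop j) k) →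
      pvRepF k v (u ++ x) = u ++ pvRepF k v x := by
  intro u
  induction u with
  | nil => intro x _; simp
  | cons c u' ih =>
    intro x H
    have h0 : ¬ k <+: (c :: u') ++ x := pvInc_not_prefix_append _ _ _ (by simpa using H 0 (by simp))
    rw [List.cons_append, pvRepF_neg _ _ _ _ (by simpa using h0)]
    rw [ih x (fun j hj => by simpa using H (j + 1) (by simpa using hj))]
    simp

-- a word all of whose nonempty suffixes are incomparable with v never becomes a prefix under pvRepF
theorem pvPres (k v : List Char) (_hk : k ≠ []) :
    ∀ n t w, t.length ≤ n → w ≠ [] →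
      (∀ w', w' <:+ w → w' ≠ [] → pvInc w' v) →
      ¬ w <+: t → ¬ w <+: pvRepF k v t := by
  intro n
  induction n with
  | zero =>
    intro t w ht hw _ _
    have : t = [] := by cases t <;> simp_all
    subst this
    simpa [pvRepF_nil, List.prefix_nil] using hw
  | succ m ih =>
    intro t w ht hw hsuf hnot
    cases t with
    | nil => simpa [pvRepF_nil, List.prefix_nil] using hw
    | cons c t' =>
      by_cases hp : k <+: c :: t'
      · rw [pvRepF_pos _ _ _ _ hp]
        have hi := hsuf w List.suffix_rfl hw
        exact pvInc_not_prefix_append _ _ _ ⟨hi.2, hi.1⟩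
      · rw [pvRepF_neg _ _ _ _ hp]
        obtain ⟨wc, wt, rfl⟩ : ∃ wc wt, w = wc :: wt := by
          cases w with
          | nil => exact absurd rfl hw
          | cons a b => exact ⟨a, b, rfl⟩
        intro hcontra
        rw [List.cons_prefix_cons] at hcontra
        obtain ⟨rfl, hwt⟩ := hcontra
        by_cases hwtnil : wt = []
        · subst hwtnil
          exact hnot (by simp [List.cons_prefix_cons])
        · have hnwt : ¬ wt <+: t' := fun hh => hnot (by simp [List.cons_prefix_cons, hh])
          exact ih t' wt (by simp at ht; omega) hwtnil
            (fun w' hw' => hsuf w' (hw'.trans ⟨[wc], rfl⟩)) hnwt hwt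

-- specification of pvFindF
theorem pvFindF_some (L : List (List Char × List Char)) (s : List Char)
    (k v : List Char) (h : pvFindF L s = some (k, v)) :
    ∃ L1 L2, L = L1 ++ (k, v) :: L2 ∧ k <+: s ∧ ∀ p ∈ L1, ¬ p.1 <+: s := by
  induction L with
  | nil => simp [pvFindF] at h
  | cons q L' ih =>
    obtain ⟨qk, qv⟩ := q
    rw [pvFindF] at h
    by_cases hp : qk.isPrefixOf s
    · rw [if_pos hp] at h
      obtain ⟨rfl, rfl⟩ : qk = k ∧ qv = v := by simpa [eq_comm] using h
      exact ⟨[], L', by simp, List.isPrefixOf_iff_prefix.1 hp, by simp⟩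
    · rw [if_neg hp] at h
      obtain ⟨L1, L2, rfl, hk, hL1⟩ := ih h
      refine ⟨(qk, qv) :: L1, L2, by simp, hk, ?_⟩
      intro p hp'
      rcases List.mem_cons.1 hp' with rfl | hmem
      · exact fun hh => hp (List.isPrefixOf_iff_prefix.2 hh)
      · exact hL1 p hmem

theorem pvFindF_none (L : List (List Char × List Char)) (s : List Char)
    (h : pvFindF L s = none) : ∀ p ∈ L, ¬ p.1 <+: s := by
  induction L with
  | nil => simp
  | cons q L' ih =>
    obtain ⟨qk, qv⟩ := q
    rw [pvFindF] at h
    by_cases hp : qk.isPrefixOf s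
    · rw [if_pos hp] at h; exact absurd h (by simp)
    · rw [if_neg hp] at h
      intro p hp'
      rcases List.mem_cons.1 hp' with rfl | hmem
      · exact fun hh => hp (List.isPrefixOf_iff_prefix.2 hh)
      · exact ih h p hmem

-- a safe block u passes through a whole fold of replacements
theorem pvFoldRep_append (M : List (List Char × List Char)) (u : List Char)
    (h : ∀ p ∈ M, p.1 ≠ [] ∧ ∀ j, j < u.length → pvInc (u.drop j) p.1) :
    ∀ x, pvFoldRep M (u ++ x) = u ++ pvFoldRep M x := by
  induction M with
  | nil => intro x; simp [pvFoldRep]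
  | cons q M' ih =>
    intro x
    have hq := h q (by simp)
    have hstep : pvRepF q.1 q.2 (u ++ x) = u ++ pvRepF q.1 q.2 x :=
      pvRepF_append_keep q.1 q.2 hq.1 u x hq.2
    simp only [pvFoldRep, List.foldl_cons] at *
    rw [hstep]
    exact ih (fun p hp => h p (by simp [hp])) (pvRepF q.1 q.2 x)

-- "no key starts at this position" is preserved by every single replacement of the table
theorem pvQ_pres (L : List (List Char × List Char)) (hG : pvGood L)
    (q : List Char × List Char) (hq : q ∈ L) (c : Char) (z : List Char)
    (p : List Char × List Char) (hp : p ∈ L)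
    (h : ¬ p.1 <+: c :: z) : ¬ p.1 <+: c :: pvRepF q.1 q.2 z := by
  obtain ⟨hne, hkeys, hksuf, hkval, hvsuf⟩ := hG
  have hp1 : p.1 ≠ [] := (hne p hp).1
  obtain ⟨d, w, hd⟩ : ∃ d w, p.1 = d :: w := by
    cases hpp : p.1 with
    | nil => exact absurd hpp hp1
    | cons a b => exact ⟨a, b, rfl⟩
  rw [hd]
  intro hcontra
  rw [List.cons_prefix_cons] at hcontra
  obtain ⟨rfl, hwpre⟩ := hcontra
  by_cases hwnil : w = []
  · subst hwnil
    exact h (by simp [hd, List.cons_prefix_cons])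
  · have hnw : ¬ w <+: z := fun hh => h (by simp [hd, List.cons_prefix_cons, hh])
    refine pvPres q.1 q.2 (hne q hq).1 z.length z w le_rfl hwnil ?_ hnw hwpre
    intro w' hw' hw'nil
    have hsufp : w' <:+ p.1 := hw'.trans (by rw [hd]; exact ⟨[d], rfl⟩)
    have heq : w' = p.1.drop (p.1.length - w'.length) := List.suffix_iff_eq_drop.1 hsufp
    have hlen1 : w'.length ≤ w.length := hw'.length_le
    have hlen2 : w.length + 1 = p.1.length := by rw [hd]; simp
    have hw'len : 0 < w'.length := List.length_pos_iff.2 hw'nil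
    rw [heq]
    exact hkval p hp q hq (p.1.length - w'.length) (by omega) (by omega)

-- when no key starts at the head, the whole fold keeps the head character
theorem pvFoldRep_cons_none (L : List (List Char × List Char)) (hG : pvGood L) (c : Char) :
    ∀ M, (∀ p ∈ M, p ∈ L) → ∀ z, (∀ p ∈ L, ¬ p.1 <+: c :: z) →
      pvFoldRep M (c :: z) = c :: pvFoldRep M z := by
  intro M
  induction M with
  | nil => intro _ z _; simp [pvFoldRep]
  | cons q M' ih =>
    intro hsub z hQ
    have hqL : q ∈ L := hsub q (by simp)
    have hstep : pvRepF q.1 q.2 (c :: z) = c :: pvRepF q.1 q.2 z := by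
      obtain ⟨qk, qv⟩ := q
      exact pvRepF_neg _ _ _ _ (hQ (qk, qv) hqL)
    simp only [pvFoldRep, List.foldl_cons] at *
    rw [hstep]
    exact ih (fun p hp => hsub p (by simp [hp])) (pvRepF q.1 q.2 z)
      (fun p hp => pvQ_pres L hG q hqL c z p hp (hQ p hp))

-- MAIN: the sequential fold of replacements equals the one-pass scan
theorem pvMain (L : List (List Char × List Char)) (hG : pvGood L) :
    ∀ n s, s.length ≤ n → pvFoldRep L s = pvScanF L s := by
  intro n
  induction n with
  | zero =>
    intro s hs
    have : s = [] := by cases s <;> simp_all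
    subst this
    have : ∀ M, pvFoldRep M ([] : List Char) = [] := by
      intro M
      induction M with
      | nil => simp [pvFoldRep]
      | cons q M' ih => simpa [pvFoldRep, pvRepF_nil, List.foldl_cons] using ih
    rw [this L]
    simp [pvScanF.eq_def]
  | succ m ih =>
    intro s hs
    cases s with
    | nil =>
      have : ∀ M, pvFoldRep M ([] : List Char) = [] := by
        intro M
        induction M with
        | nil => simp [pvFoldRep]
        | cons q M' ih' => simpa [pvFoldRep, pvRepF_nil, List.foldl_cons] using ih'
      rw [this L]
      simp [pvScanF.eq_def]
    | cons c t =>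
      cases hfind : pvFindF L (c :: t) with
      | some kv =>
        obtain ⟨k, v⟩ := kv
        obtain ⟨L1, L2, hL, hkpre, hL1⟩ := pvFindF_some L (c :: t) k v hfind
        obtain ⟨hne, hkeys, hksuf, hkval, hvsuf⟩ := hG
        have hkL : (k, v) ∈ L := by rw [hL]; simp
        have hknil : k ≠ [] := (hne (k, v) hkL).1
        have hkpre' := hkpre
        obtain ⟨r, hr⟩ := hkpre'
        -- L1 passes over the k-block
        have hstep1 : pvFoldRep L1 (k ++ r) = k ++ pvFoldRep L1 r := by
          refine pvFoldRep_append L1 k ?_ r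
          intro p hpL1
          have hpL : p ∈ L := by rw [hL]; simp [hpL1]
          have hpk : p.1 ≠ k := by
            intro hh
            exact hL1 p hpL1 (hh ▸ hkpre)
          refine ⟨(hne p hpL).1, ?_⟩
          intro j hj
          by_cases hj0 : j = 0
          · subst hj0
            simpa using (hkeys (k, v) hkL p hpL (fun hh => hpk hh.symm))
          · exact hksuf (k, v) hkL p hpL j hj (by omega)
        -- L2 passes over the v-block
        have hstep2 : ∀ y, pvFoldRep L2 (v ++ y) = v ++ pvFoldRep L2 y := by
          refine pvFoldRep_append L2 v ?_
          intro p hpL2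
          have hpL : p ∈ L := by rw [hL]; simp [hpL2]
          exact ⟨(hne p hpL).1, fun j hj => hvsuf (k, v) hkL p hpL j hj⟩
        have hsplit : ∀ y, pvFoldRep L y = pvFoldRep L2 (pvRepF k v (pvFoldRep L1 y)) := by
          intro y
          simp [pvFoldRep, hL, List.foldl_append]
        have hrlen : r.length ≤ m := by
          have : (c :: t).length = k.length + r.length := by rw [← hr]; simp
          have hk1 : 0 < k.length := List.length_pos_iff.2 hknil
          simp at this hs
          omega
        have hdrop : t.drop (k.length - 1) = r := by
          obtain ⟨kc, kt, rfl⟩ : ∃ kc kt, k = kc :: kt := by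
            cases k with
            | nil => exact absurd rfl hknil
            | cons a b => exact ⟨a, b, rfl⟩
          have : t = kt ++ r := by
            rw [List.cons_append] at hr
            exact (List.cons_eq_cons.1 hr.symm).2
          rw [this]
          simp
        calc pvFoldRep L (c :: t)
            = pvFoldRep L2 (pvRepF k v (pvFoldRep L1 (k ++ r))) := by rw [hsplit, hr]
          _ = pvFoldRep L2 (v ++ pvRepF k v (pvFoldRep L1 r)) := by
                rw [hstep1, pvRepF_self k v _ hknil]
          _ = v ++ pvFoldRep L (r) := by rw [hstep2, hsplit]
          _ = v ++ pvScanF L r := by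
                rw [ih r hrlen]
          _ = pvScanF L (c :: t) := by
                conv_rhs => rw [pvScanF.eq_def]
                simp only [hfind, hdrop]
      | none =>
        have hQ := pvFindF_none L (c :: t) hfind
        have := pvFoldRep_cons_none L hG c L (fun p hp => hp) t hQ
        rw [this, ih t (by simp at hs; omega)]
        conv_rhs => rw [pvScanF.eq_def]
        simp only [hfind]

-- bridge: port A over char lists
theorem pvA_chars : ∀ (ps : List (String × String)) (s : String),
    (∀ p ∈ ps, p.1.toList ≠ []) →
    ps.foldl (fun s kv => PySem.Str.replace s kv.1 kv.2) s =
      String.ofList (pvFoldRep (ps.map (fun p => (p.1.toList, p.2.toList))) s.toList) := by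
  intro ps
  induction ps with
  | nil => intro s _; simp [pvFoldRep, String.ofList_toList]
  | cons q ps' ih =>
    intro s hne
    simp only [List.foldl_cons, List.map_cons]
    rw [ih _ (fun p hp => hne p (by simp [hp]))]
    have h1 : (PySem.Str.replace s q.1 q.2).toList = pvRepF q.1.toList q.2.toList s.toList := by
      rw [PySem.Str.toList_replace]
      exact pvReplace_eq _ _ _ (hne q (by simp))
    have h2 : pvFoldRep ((q.1.toList, q.2.toList) :: ps'.map (fun p => (p.1.toList, p.2.toList)))
          s.toList
        = pvFoldRep (ps'.map (fun p => (p.1.toList, p.2.toList)))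
            (pvRepF q.1.toList q.2.toList s.toList) := by
      simp [pvFoldRep, List.foldl_cons]
    rw [h2, ← h1]

-- bridge: port B's scan is the generic scan over pvKVc
theorem pvFindB_eq (kvs : List (String × String)) (s : List Char) :
    pvFindF (kvs.map (fun p => (p.1.toList, p.2.toList))) s
      = (pvFindB kvs s).map (fun p => (p.1.toList, p.2.toList)) := by
  induction kvs with
  | nil => simp [pvFindF, pvFindB]
  | cons q kvs' ih =>
    obtain ⟨qk, qv⟩ := q
    rw [List.map_cons, pvFindF, pvFindB]
    by_cases hp : qk.toList.isPrefixOf s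
    · simp [hp]
    · simp [hp, ih]

theorem pvScanB_eq : ∀ n s, s.length ≤ n → pvScanB s = pvScanF pvKVc s := by
  intro n
  induction n with
  | zero =>
    intro s hs
    have : s = [] := by cases s <;> simp_all
    subst this
    simp [pvScanB.eq_def, pvScanF.eq_def]
  | succ m ih =>
    intro s hs
    cases s with
    | nil => simp [pvScanB.eq_def, pvScanF.eq_def]
    | cons c t =>
      cases hfind : pvFindB pvTradB (c :: t) with
      | none =>
        have h2 : pvFindF pvKVc (c :: t) = none := by
          rw [pvKVc, pvFindB_eq, hfind]; rfl
        rw [pvScanB.eq_def, pvScanF.eq_def]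
        simp only [hfind, h2]
        rw [ih t (by simp at hs; omega)]
      | some kv =>
        obtain ⟨k, v⟩ := kv
        have h2 : pvFindF pvKVc (c :: t) = some (k.toList, v.toList) := by
          rw [pvKVc, pvFindB_eq, hfind]; rfl
        rw [pvScanB.eq_def, pvScanF.eq_def]
        simp only [hfind, h2]
        rw [ih (t.drop (k.toList.length - 1)) (by simp at hs ⊢; omega)]

-- ===== VERDICT (by name: the statement is the Claim_ definition above) =====
theorem to_french_date_spec : Claim_equal_to_french_date := by
  intro s _
  unfold Spec_to_french_date to_french_date to_french_date_alt
  have hitems : (PySem.Dict.ofList [("Monday", "   Lundi"), ("Tuesday", "   Mardi"),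
      ("Wednesday", "Mercredi"), ("Thursday", "   Jeudi"), ("Friday", "Vendredi"),
      ("Saturday", "  Samedi"), ("Sunday", "Dimanche")] : PySem.Dict String String).items
      = pvTradB := by decide
  simp only [hitems]
  rw [pvA_chars pvTradB s (by decide)]
  show String.ofList (pvFoldRep pvKVc s.toList) = String.ofList (pvScanB s.toList)
  rw [pvMain pvKVc pvGood_KVc s.toList.length s.toList le_rfl]
  rw [pvScanB_eq s.toList.length s.toList le_rfl]
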